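-- pv_equiv track=rewrite | github.com/XuanTung2k3/Chatbot-Bank | Finance/tests/chatbot_test_flow.py | summarize_question_file_rows
-- ===== SOURCE A (Python) =====
-- from typing import Dict, Iterable, List, Sequence
--
-- def summarize_question_file_rows(rows: Sequence[Dict[str, str]]) -> Dict[str, Dict[str, int]]:
--     summary: Dict[str, Dict[str, int]] = {}
--     for row in rows:
--         mode = row["mode"] or "unknown"
--         stats = summary.setdefault(mode, {"total": 0, "transport_error": 0, "empty_response": 0, "non_substantive_turn": 0})
--         stats["total"] += 1
--         if row.get("transport_error"):
--             stats["transport_error"] += 1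
--         if not row.get("response", "").strip():
--             stats["empty_response"] += 1
--         if row.get("turn_classification") and row.get("turn_classification") != "substantive":
--             stats["non_substantive_turn"] += 1
--     return summary
-- ===== SOURCE B (Python) =====
-- def summarize_question_file_rows(rows):
--     # Phase 1: partition rows by mode (insertion order of first appearance).
--     groups = {}
--     for row in rows:
--         groups.setdefault(row["mode"] or "unknown", []).append(row)
--     # Phase 2: summarize each group independently.
--     return {
--         mode: {
--             "total": len(group),
--             "transport_error": sum(1 for r in group if r.get("transport_error")),
--             "empty_response": sum(1 for r in group if not r.get("response", "").strip()),
--             "non_substantive_turn": sum(1 for r in group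
--                                         if r.get("turn_classification") and r.get("turn_classification") != "substantive"),
--         }
--         for mode, group in groups.items()
--     }
-- ===== Notes on version B (the rewrite author's own statement) =====
-- stated objective: alternative
-- what changed: Replaces A's single pass with in-place per-mode counter updates by a two-phase group-then-count shape: first partition rows into per-mode lists, then summarize each group with len and sum-of-flag scans.
import Mathlib
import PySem

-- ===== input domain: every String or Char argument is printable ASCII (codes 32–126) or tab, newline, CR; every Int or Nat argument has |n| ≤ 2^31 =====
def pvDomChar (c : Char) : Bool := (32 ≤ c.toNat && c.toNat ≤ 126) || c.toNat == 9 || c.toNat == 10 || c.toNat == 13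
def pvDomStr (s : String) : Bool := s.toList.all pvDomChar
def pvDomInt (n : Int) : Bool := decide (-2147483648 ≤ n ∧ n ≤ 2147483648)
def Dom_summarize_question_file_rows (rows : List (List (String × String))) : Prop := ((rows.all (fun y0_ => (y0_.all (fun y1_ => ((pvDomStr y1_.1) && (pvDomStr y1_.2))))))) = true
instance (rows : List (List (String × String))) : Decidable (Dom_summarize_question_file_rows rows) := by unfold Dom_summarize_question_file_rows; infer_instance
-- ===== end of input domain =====

-- B replaces A's single pass of in-place counter updates by a two-phase group-then-count shape (same cost, different decomposition).

-- ===== PORT A =====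
-- per-row expressions both Pythons evaluate verbatim on a row
-- mode = row["mode"] or "unknown"  (under Pre_ the key is present, so getD's default is never the result)
def pvMode (row : List (String × String)) : String :=
  let m := (PySem.Dict.mk row).getD "mode" ""
  if m = "" then "unknown" else m

-- bool(row.get("transport_error"))  (missing key and "" are both falsy)
def pvFlagTransport (row : List (String × String)) : Bool :=
  (PySem.Dict.mk row).getD "transport_error" "" ≠ ""

-- not row.get("response", "").strip()
def pvFlagEmpty (row : List (String × String)) : Bool :=
  PySem.Str.strip ((PySem.Dict.mk row).getD "response" "") = ""

-- row.get("turn_classification") and row.get("turn_classification") != "substantive"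
def pvFlagNonSub (row : List (String × String)) : Bool :=
  let t := (PySem.Dict.mk row).getD "turn_classification" ""
  t ≠ "" && t ≠ "substantive"

def pvStatsInit : PySem.Dict String Int :=
  PySem.Dict.ofList [("total", 0), ("transport_error", 0), ("empty_response", 0), ("non_substantive_turn", 0)]

-- if flag: stats[k] += 1   (the three guarded counter bumps of A's loop body)
def pvBumpIf (stats : PySem.Dict String Int) (flag : Bool) (k : String) : PySem.Dict String Int :=
  if flag then stats.modify k 0 (· + 1) else stats

def pvStepA (summary : PySem.Dict String (PySem.Dict String Int)) (row : List (String × String)) :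
    PySem.Dict String (PySem.Dict String Int) :=
  let mode := pvMode row
  let summary := summary.setdefault mode pvStatsInit
  let stats := summary.getD mode pvStatsInit
  let stats := stats.modify "total" 0 (· + 1)
  let stats := pvBumpIf stats (pvFlagTransport row) "transport_error"
  let stats := pvBumpIf stats (pvFlagEmpty row) "empty_response"
  let stats := pvBumpIf stats (pvFlagNonSub row) "non_substantive_turn"
  summary.insert mode stats

def summarize_question_file_rows (rows : List (List (String × String))) : List (String × List (String × Int)) :=
  ((rows.foldl pvStepA PySem.Dict.empty).items).map (fun p => (p.1, p.2.items))

-- ===== PORT B =====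
-- Phase 1: partition rows by mode (groups.setdefault(mode, []).append(row))
def pvGroups (rows : List (List (String × String))) : PySem.Dict String (List (List (String × String))) :=
  rows.foldl (fun g row => g.modify (pvMode row) [] (· ++ [row])) PySem.Dict.empty

-- Phase 2: summarize one group (len and the three sum(1 for r in group if flag) scans)
def pvStatsOf (g : List (List (String × String))) : List (String × Int) :=
  [("total", (g.length : Int)),
   ("transport_error", (g.countP pvFlagTransport : Int)),
   ("empty_response", (g.countP pvFlagEmpty : Int)),
   ("non_substantive_turn", (g.countP pvFlagNonSub : Int))]

def summarize_question_file_rows_alt (rows : List (List (String × String))) : List (String × List (String × Int)) :=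
  ((pvGroups rows).items).map (fun p => (p.1, pvStatsOf p.2))

-- ===== PRECONDITION & SPEC =====
-- Pre_ excludes exactly the inputs with a row lacking the "mode" key, on which both Pythons raise KeyError at row["mode"].
def Pre_summarize_question_file_rows (rows : List (List (String × String))) : Prop :=
  ∀ row ∈ rows, (PySem.Dict.mk row).contains "mode" = true
instance (rows : List (List (String × String))) : Decidable (Pre_summarize_question_file_rows rows) := by
  unfold Pre_summarize_question_file_rows; infer_instance

def pvWitness_summarize_question_file_rows : (List (List (String × String))) :=
  [[("mode", "fast"), ("response", "hi")], [("mode", ""), ("transport_error", "x")]]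

def Spec_summarize_question_file_rows (rows : List (List (String × String))) (out : List (String × List (String × Int))) : Prop := out = summarize_question_file_rows_alt rows
instance (rows : List (List (String × String))) (out : List (String × List (String × Int))) : Decidable (Spec_summarize_question_file_rows rows out) := by unfold Spec_summarize_question_file_rows; infer_instance

-- ===== CLAIM (what is proved, stated in full; the proofs are below) =====
def Claim_equal_summarize_question_file_rows : Prop := ∀ (rows : List (List (String × String))), Dom_summarize_question_file_rows rows → Pre_summarize_question_file_rows rows → Spec_summarize_question_file_rows rows (summarize_question_file_rows rows)

-- ===== LEMMAS AND PROOFS =====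

-- the stats dict A maintains for the group g of rows that share one mode
def pvStatsD (g : List (List (String × String))) : PySem.Dict String Int :=
  PySem.Dict.mk (pvStatsOf g)

lemma pvStatsD_nil : pvStatsD [] = pvStatsInit := by rfl

-- one A-step on the stats dict of a group appends the row to the group
lemma pvStats_step (g : List (List (String × String))) (row : List (String × String)) :
    pvBumpIf (pvBumpIf (pvBumpIf ((pvStatsD g).modify "total" 0 (· + 1))
        (pvFlagTransport row) "transport_error")
        (pvFlagEmpty row) "empty_response")
        (pvFlagNonSub row) "non_substantive_turn"
    = pvStatsD (g ++ [row]) := by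
  cases h1 : pvFlagTransport row <;> cases h2 : pvFlagEmpty row <;> cases h3 : pvFlagNonSub row <;>
    simp [pvBumpIf, pvStatsD, pvStatsOf, h1, h2, h3, List.countP_append] <;> rfl

-- the B-side groups dict viewed through per-group summarisation
def pvMsum (g : PySem.Dict String (List (List (String × String)))) : PySem.Dict String (PySem.Dict String Int) :=
  PySem.Dict.mk (g.items.map (fun p => (p.1, pvStatsD p.2)))

lemma pvMsum_contains (g : PySem.Dict String (List (List (String × String)))) (k : String) :
    (pvMsum g).contains k = g.contains k := by
  simp [pvMsum, PySem.Dict.contains, List.any_map, Function.comp_def]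

lemma pvMsum_get? (g : PySem.Dict String (List (List (String × String)))) (k : String) :
    (pvMsum g).get? k = (g.get? k).map pvStatsD := by
  simp [pvMsum, PySem.Dict.get?, List.find?_map, Function.comp_def, Option.map_map]

lemma pvMsum_insert (g : PySem.Dict String (List (List (String × String)))) (k : String)
    (v : List (List (String × String))) :
    (pvMsum g).insert k (pvStatsD v) = pvMsum (g.insert k v) := by
  unfold PySem.Dict.insert
  rw [pvMsum_contains]
  split_ifs with h
  · simp only [pvMsum, List.map_map]
    congr 1
    apply List.map_congr_left
    intro p _
    by_cases hp : p.1 = k <;> simp [hp]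
  · simp [pvMsum]

-- one A-step on the summarised view is the summarised view of one B-step
lemma pvStep_eq (g : PySem.Dict String (List (List (String × String)))) (row : List (String × String)) :
    pvStepA (pvMsum g) row = pvMsum (g.modify (pvMode row) [] (· ++ [row])) := by
  by_cases h : g.contains (pvMode row) = true
  · have hset : (pvMsum g).setdefault (pvMode row) pvStatsInit = pvMsum g := by
      unfold PySem.Dict.setdefault
      rw [pvMsum_contains]
      simp [h]
    have hg : (pvMsum g).getD (pvMode row) pvStatsInit = pvStatsD (g.getD (pvMode row) []) := by
      unfold PySem.Dict.getD
      rw [pvMsum_get?]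
      cases hq : g.get? (pvMode row) with
      | none =>
        exfalso
        unfold PySem.Dict.contains at h
        unfold PySem.Dict.get? at hq
        have hf : g.items.find? (fun p => p.1 == pvMode row) = none := by
          cases hf : g.items.find? (fun p => p.1 == pvMode row) with
          | none => rfl
          | some x => simp [hf] at hq
        have hnone := List.find?_eq_none.mp hf
        simp only [List.any_eq_true] at h
        obtain ⟨p, hp, hpk⟩ := h
        exact absurd hpk (by simpa using hnone p hp)
      | some v => simp
    have hmod : g.modify (pvMode row) [] (· ++ [row])
        = g.insert (pvMode row) (g.getD (pvMode row) [] ++ [row]) := rfl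
    simp only [pvStepA, hset, hg, pvStats_step, hmod, pvMsum_insert]
  · have hgf : g.items.find? (fun p => p.1 == pvMode row) = none := by
      unfold PySem.Dict.contains at h
      cases hf : g.items.find? (fun p => p.1 == pvMode row) with
      | none => rfl
      | some x =>
        exact absurd (List.any_eq_true.mpr ⟨x, List.mem_of_find?_eq_some hf, by
          have := List.find?_some hf; simpa using this⟩) h
    have hq : g.get? (pvMode row) = none := by
      unfold PySem.Dict.get?; rw [hgf]; rfl
    have hgnomatch : ∀ p ∈ g.items, (p.1 == pvMode row) = false := by
      intro p hp
      simpa using List.find?_eq_none.mp hgf p hp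
    have hfindm : (pvMsum g).items.find? (fun p => p.1 == pvMode row) = none := by
      have hh := pvMsum_get? g (pvMode row)
      rw [hq] at hh
      unfold PySem.Dict.get? at hh
      cases hf : (pvMsum g).items.find? (fun p => p.1 == pvMode row) with
      | none => rfl
      | some x => simp [hf] at hh
    have hset : (pvMsum g).setdefault (pvMode row) pvStatsInit
        = PySem.Dict.mk ((pvMsum g).items ++ [(pvMode row, pvStatsInit)]) := by
      unfold PySem.Dict.setdefault
      rw [pvMsum_contains]
      simp [h]
    have hgetapp : (PySem.Dict.mk ((pvMsum g).items ++ [(pvMode row, pvStatsInit)])).getD (pvMode row) pvStatsInit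
        = pvStatsD [] := by
      unfold PySem.Dict.getD PySem.Dict.get?
      simp [List.find?_append, hfindm, pvStatsD_nil]
    have hgd : g.getD (pvMode row) [] = [] := by
      unfold PySem.Dict.getD; rw [hq]; rfl
    have hcont : (PySem.Dict.mk ((pvMsum g).items ++ [(pvMode row, pvStatsInit)])).contains (pvMode row) = true := by
      unfold PySem.Dict.contains
      simp
    have hnomatch : ∀ p ∈ (pvMsum g).items, (p.1 == pvMode row) = false := by
      intro p hp
      have := List.find?_eq_none.mp hfindm p hp
      simpa using this
    have hmod : g.modify (pvMode row) [] (· ++ [row])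
        = g.insert (pvMode row) (g.getD (pvMode row) [] ++ [row]) := rfl
    simp only [pvStepA, hset, hgetapp, pvStats_step, hmod, hgd, List.nil_append]
    unfold PySem.Dict.insert
    rw [hcont]
    simp only [if_true]
    have hcg : g.contains (pvMode row) = false := by simpa using h
    simp only [pvMsum, hcg, Bool.false_eq_true, if_false, List.map_append]
    rw [List.map_map]
    have hmap : List.map ((fun p => if (p.1 == pvMode row) = true then (pvMode row, pvStatsD [row]) else p)
          ∘ (fun p : String × List (List (String × String)) => (p.1, pvStatsD p.2))) g.items
        = List.map (fun p => (p.1, pvStatsD p.2)) g.items :=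
      List.map_congr_left (fun p hp => by
        have hne : p.1 ≠ pvMode row := by simpa using hgnomatch p hp
        simp [hne])
    rw [hmap]
    simp

lemma pvFold_eq (rows : List (List (String × String))) :
    ∀ g : PySem.Dict String (List (List (String × String))),
      rows.foldl pvStepA (pvMsum g) = pvMsum (rows.foldl (fun g row => g.modify (pvMode row) [] (· ++ [row])) g) := by
  induction rows with
  | nil => intro g; rfl
  | cons r rs ih =>
    intro g
    simp only [List.foldl_cons, pvStep_eq]
    exact ih _

-- ===== VERDICT (by name: the statement is the Claim_ definition above) =====
theorem summarize_question_file_rows_spec : Claim_equal_summarize_question_file_rows := by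
  intro rows _ _
  unfold Spec_summarize_question_file_rows summarize_question_file_rows summarize_question_file_rows_alt pvGroups
  have hempty : (PySem.Dict.empty : PySem.Dict String (PySem.Dict String Int)) = pvMsum PySem.Dict.empty := rfl
  rw [hempty, pvFold_eq]
  simp [pvMsum, pvStatsD, List.map_map, Function.comp]
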